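-- pv_equiv track=rewrite | github.com/tinkertanker/discord-missing-person-finder | src/analyze_matching.py | analyze_group_format
-- ===== SOURCE A (Python) =====
-- def analyze_group_format(attendee_names):
--     """
--     Analyze the format of group information in attendee names.
--
--     Args:
--         attendee_names: List of attendee names
--
--     Returns:
--         dict: Statistics about group format patterns
--     """
--     patterns = {
--         "contains_slash": 0,
--         "contains_dash": 0,
--         "contains_parens": 0,
--         "contains_brackets": 0,
--         "contains_comma": 0,
--         "total": len(attendee_names)
--     }
--
--     examples = {
--         "contains_slash": [],
--         "contains_dash": [],
--         "contains_parens": [],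
--         "contains_brackets": [],
--         "contains_comma": []
--     }
--
--     for name in attendee_names:
--         if '/' in name:
--             patterns["contains_slash"] += 1
--             if len(examples["contains_slash"]) < 5:
--                 examples["contains_slash"].append(name)
--
--         if '-' in name:
--             patterns["contains_dash"] += 1
--             if len(examples["contains_dash"]) < 5:
--                 examples["contains_dash"].append(name)
--
--         if '(' in name or ')' in name:
--             patterns["contains_parens"] += 1
--             if len(examples["contains_parens"]) < 5:
--                 examples["contains_parens"].append(name)
--
--         if '[' in name or ']' in name:
--             patterns["contains_brackets"] += 1
--             if len(examples["contains_brackets"]) < 5: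
--                 examples["contains_brackets"].append(name)
--
--         if ',' in name:
--             patterns["contains_comma"] += 1
--             if len(examples["contains_comma"]) < 5:
--                 examples["contains_comma"].append(name)
--
--     return patterns, examples
-- ===== SOURCE B (Python) =====
-- def analyze_group_format(attendee_names):
--     table = [
--         ("contains_slash", lambda n: '/' in n),
--         ("contains_dash", lambda n: '-' in n),
--         ("contains_parens", lambda n: '(' in n or ')' in n),
--         ("contains_brackets", lambda n: '[' in n or ']' in n),
--         ("contains_comma", lambda n: ',' in n),
--     ]
--     patterns = {}
--     examples = {}
--     for key, pred in table:
--         matches = [n for n in attendee_names if pred(n)]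
--         patterns[key] = len(matches)
--         examples[key] = matches[:5]
--     patterns["total"] = len(attendee_names)
--     return patterns, examples
-- ===== Notes on version B (the rewrite author's own statement) =====
-- stated objective: simpler
-- what changed: Replaced the single combined pass mutating ten counters/lists with a table of (key, predicate) pairs, one filter per pattern giving count = len(matches) and examples = matches[:5].
import Mathlib
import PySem

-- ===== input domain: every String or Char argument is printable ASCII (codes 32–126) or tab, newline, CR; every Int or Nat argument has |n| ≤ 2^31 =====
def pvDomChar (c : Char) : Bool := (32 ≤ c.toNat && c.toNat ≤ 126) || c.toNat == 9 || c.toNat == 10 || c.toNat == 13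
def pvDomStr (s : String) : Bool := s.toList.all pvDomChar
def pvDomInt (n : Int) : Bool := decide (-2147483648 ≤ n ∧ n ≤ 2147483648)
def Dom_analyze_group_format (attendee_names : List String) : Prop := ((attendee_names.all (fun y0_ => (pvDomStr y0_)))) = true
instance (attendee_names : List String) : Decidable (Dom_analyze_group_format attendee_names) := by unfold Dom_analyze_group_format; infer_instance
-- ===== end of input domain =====

-- B replaces A's single pass mutating ten counters/lists by a table of (key, predicate)
-- pairs with one filter per pattern; objective: simpler.

-- ===== PORT A =====
-- state: the five counters of `patterns` and the five example lists, in A's key order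
def pvStepA (s : (Int × Int × Int × Int × Int) × (List String × List String × List String × List String × List String))
    (name : String) :
    (Int × Int × Int × Int × Int) × (List String × List String × List String × List String × List String) :=
  let c := s.1; let e := s.2
  let c1 := if PySem.Str.isIn "/" name then c.1 + 1 else c.1
  let e1 := if PySem.Str.isIn "/" name then (if e.1.length < 5 then e.1 ++ [name] else e.1) else e.1
  let c2 := if PySem.Str.isIn "-" name then c.2.1 + 1 else c.2.1
  let e2 := if PySem.Str.isIn "-" name then (if e.2.1.length < 5 then e.2.1 ++ [name] else e.2.1) else e.2.1
  let c3 := if PySem.Str.isIn "(" name || PySem.Str.isIn ")" name then c.2.2.1 + 1 else c.2.2.1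
  let e3 := if PySem.Str.isIn "(" name || PySem.Str.isIn ")" name then (if e.2.2.1.length < 5 then e.2.2.1 ++ [name] else e.2.2.1) else e.2.2.1
  let c4 := if PySem.Str.isIn "[" name || PySem.Str.isIn "]" name then c.2.2.2.1 + 1 else c.2.2.2.1
  let e4 := if PySem.Str.isIn "[" name || PySem.Str.isIn "]" name then (if e.2.2.2.1.length < 5 then e.2.2.2.1 ++ [name] else e.2.2.2.1) else e.2.2.2.1
  let c5 := if PySem.Str.isIn "," name then c.2.2.2.2 + 1 else c.2.2.2.2
  let e5 := if PySem.Str.isIn "," name then (if e.2.2.2.2.length < 5 then e.2.2.2.2 ++ [name] else e.2.2.2.2) else e.2.2.2.2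
  ((c1, c2, c3, c4, c5), (e1, e2, e3, e4, e5))

def analyze_group_format (attendee_names : List String) : (List (String × Int)) × (List (String × List String)) :=
  let fin := attendee_names.foldl pvStepA ((0, 0, 0, 0, 0), ([], [], [], [], []))
  ([("contains_slash", fin.1.1), ("contains_dash", fin.1.2.1), ("contains_parens", fin.1.2.2.1),
    ("contains_brackets", fin.1.2.2.2.1), ("contains_comma", fin.1.2.2.2.2),
    ("total", (attendee_names.length : Int))],
   [("contains_slash", fin.2.1), ("contains_dash", fin.2.2.1), ("contains_parens", fin.2.2.2.1),
    ("contains_brackets", fin.2.2.2.2.1), ("contains_comma", fin.2.2.2.2.2)])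

-- ===== PORT B =====
def pvTable : List (String × (String → Bool)) :=
  [("contains_slash", fun n => PySem.Str.isIn "/" n),
   ("contains_dash", fun n => PySem.Str.isIn "-" n),
   ("contains_parens", fun n => PySem.Str.isIn "(" n || PySem.Str.isIn ")" n),
   ("contains_brackets", fun n => PySem.Str.isIn "[" n || PySem.Str.isIn "]" n),
   ("contains_comma", fun n => PySem.Str.isIn "," n)]

def analyze_group_format_alt (attendee_names : List String) : (List (String × Int)) × (List (String × List String)) :=
  let patterns := pvTable.map (fun kp => (kp.1, ((attendee_names.filter kp.2).length : Int)))
  let examples := pvTable.map (fun kp => (kp.1, (attendee_names.filter kp.2).take 5))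
  (patterns ++ [("total", (attendee_names.length : Int))], examples)

-- ===== PRECONDITION & SPEC =====
def Spec_analyze_group_format (attendee_names : List String) (out : (List (String × Int)) × (List (String × List String))) : Prop := out = analyze_group_format_alt attendee_names
instance (attendee_names : List String) (out : (List (String × Int)) × (List (String × List String))) : Decidable (Spec_analyze_group_format attendee_names out) := by unfold Spec_analyze_group_format; infer_instance

-- ===== CLAIM (what is proved, stated in full; the proofs are below) =====
def Claim_equal_analyze_group_format : Prop := ∀ (attendee_names : List String), Dom_analyze_group_format attendee_names → Spec_analyze_group_format attendee_names (analyze_group_format attendee_names)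

-- ===== LEMMAS AND PROOFS =====

-- one pattern's (count, first-5-examples) loop
def pvOne (pred : String → Bool) : List String → Int → List String → Int × List String
  | [], c, e => (c, e)
  | n :: t, c, e =>
    if pred n then pvOne pred t (c + 1) (if e.length < 5 then e ++ [n] else e)
    else pvOne pred t c e

theorem pvOne_eq (pred : String → Bool) (names : List String) : ∀ (c : Int) (e : List String),
    pvOne pred names c e = (c + ((names.filter pred).length : Int), e ++ (names.filter pred).take (5 - e.length)) := by
  induction names with
  | nil => intro c e; simp [pvOne]
  | cons n t ih =>
    intro c e
    by_cases h : pred n = true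
    · simp only [pvOne, h, if_true, List.filter_cons, ih]
      by_cases h5 : e.length < 5
      · have : 5 - e.length = (5 - (e.length + 1)) + 1 := by omega
        simp [h5, this, List.take_succ_cons]
        ring
      · have : 5 - e.length = 0 := by omega
        simp [h5, this]
        ring
    · simp [pvOne, h, ih]

theorem pvOne_cons (pred : String → Bool) (n : String) (t : List String) (c : Int) (e : List String) :
    pvOne pred (n :: t) c e =
      pvOne pred t (if pred n then c + 1 else c)
        (if pred n then (if e.length < 5 then e ++ [n] else e) else e) := by
  by_cases h : pred n = true <;> simp [pvOne, h]

theorem foldl_stepA_eq (names : List String) :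
    ∀ (c1 c2 c3 c4 c5 : Int) (e1 e2 e3 e4 e5 : List String),
    names.foldl pvStepA ((c1, c2, c3, c4, c5), (e1, e2, e3, e4, e5)) =
      (((pvOne (fun n => PySem.Str.isIn "/" n) names c1 e1).1,
        (pvOne (fun n => PySem.Str.isIn "-" n) names c2 e2).1,
        (pvOne (fun n => PySem.Str.isIn "(" n || PySem.Str.isIn ")" n) names c3 e3).1,
        (pvOne (fun n => PySem.Str.isIn "[" n || PySem.Str.isIn "]" n) names c4 e4).1,
        (pvOne (fun n => PySem.Str.isIn "," n) names c5 e5).1),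
       ((pvOne (fun n => PySem.Str.isIn "/" n) names c1 e1).2,
        (pvOne (fun n => PySem.Str.isIn "-" n) names c2 e2).2,
        (pvOne (fun n => PySem.Str.isIn "(" n || PySem.Str.isIn ")" n) names c3 e3).2,
        (pvOne (fun n => PySem.Str.isIn "[" n || PySem.Str.isIn "]" n) names c4 e4).2,
        (pvOne (fun n => PySem.Str.isIn "," n) names c5 e5).2)) := by
  induction names with
  | nil => intro c1 c2 c3 c4 c5 e1 e2 e3 e4 e5; simp [pvOne]
  | cons n t ih =>
    intro c1 c2 c3 c4 c5 e1 e2 e3 e4 e5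
    simp only [List.foldl_cons, pvStepA, ih, pvOne_cons]

-- ===== VERDICT (by name: the statement is the Claim_ definition above) =====
theorem analyze_group_format_spec : Claim_equal_analyze_group_format := by
  intro names _
  unfold Spec_analyze_group_format analyze_group_format analyze_group_format_alt pvTable
  simp only [foldl_stepA_eq, pvOne_eq, List.map_cons, List.map_nil]
  simp
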